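-- pv_equiv track=rewrite | github.com/revarbat/BelfryCAD | src/BelfryCAD/gui/grid_info.py | _subscript_numbers
-- ===== SOURCE A (Python) =====
-- def _subscript_numbers(value: int) -> str:
--     """Get the subscript for the given number string."""
--     subscripts = {
--         "0": "₀", "1": "₁", "2": "₂", "3": "₃", "4": "₄",
--         "5": "₅", "6": "₆", "7": "₇", "8": "₈", "9": "₉",
--     }
--     valstr = f"{value}"
--     for digit, subscript in subscripts.items():
--         valstr = valstr.replace(digit, subscript)
--     return valstr
-- ===== SOURCE B (Python) =====
-- def _subscript_numbers(value: int) -> str: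
--     """Get the subscript for the given number string."""
--     subscripts = {
--         "0": "\u2080", "1": "\u2081", "2": "\u2082", "3": "\u2083", "4": "\u2084",
--         "5": "\u2085", "6": "\u2086", "7": "\u2087", "8": "\u2088", "9": "\u2089",
--     }
--     return "".join(subscripts.get(c, c) for c in f"{value}")
-- ===== Notes on version B (the rewrite author's own statement) =====
-- stated objective: simpler
-- what changed: Replaces ten sequential full-string .replace() passes with a single left-to-right pass mapping each character through the dict with an identity fallback and joining.
import Mathlib
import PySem

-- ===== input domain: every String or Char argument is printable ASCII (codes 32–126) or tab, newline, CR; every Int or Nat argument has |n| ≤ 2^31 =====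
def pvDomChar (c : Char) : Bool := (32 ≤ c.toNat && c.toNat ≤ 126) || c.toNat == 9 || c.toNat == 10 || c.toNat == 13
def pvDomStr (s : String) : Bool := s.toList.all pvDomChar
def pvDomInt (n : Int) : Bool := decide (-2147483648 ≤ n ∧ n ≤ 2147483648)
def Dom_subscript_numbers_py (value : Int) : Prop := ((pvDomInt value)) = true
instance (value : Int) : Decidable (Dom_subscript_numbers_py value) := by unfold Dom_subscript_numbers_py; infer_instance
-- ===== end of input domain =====

-- B replaces A's ten sequential full-string replace passes by one left-to-right pass
-- mapping each character through the digit→subscript table (identity fallback); simpler, same result.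


-- ===== PORT A =====
-- the dict literal, in insertion order (keys/values are 1-char strings in Python)
def subscriptPairs : List (String × String) :=
  [("0", "₀"), ("1", "₁"), ("2", "₂"), ("3", "₃"), ("4", "₄"),
   ("5", "₅"), ("6", "₆"), ("7", "₇"), ("8", "₈"), ("9", "₉")]

def subscript_numbers_py (value : Int) : String :=
  subscriptPairs.foldl (fun valstr p => PySem.Str.replace valstr p.1 p.2) (PySem.Int.toStr value)

-- ===== PORT B =====
-- the same dict, keyed by the characters iteration over the string yields
def subscriptDict : PySem.Dict Char Char :=
  PySem.Dict.mk [('0', '₀'), ('1', '₁'), ('2', '₂'), ('3', '₃'), ('4', '₄'),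
   ('5', '₅'), ('6', '₆'), ('7', '₇'), ('8', '₈'), ('9', '₉')]

def subscript_numbers_py_alt (value : Int) : String :=
  String.ofList ((PySem.Int.toChars value).map (fun c => PySem.Dict.getD subscriptDict c c))

-- ===== PRECONDITION & SPEC =====
def Spec_subscript_numbers_py (value : Int) (out : String) : Prop := out = subscript_numbers_py_alt value
instance (value : Int) (out : String) : Decidable (Spec_subscript_numbers_py value out) := by unfold Spec_subscript_numbers_py; infer_instance

-- ===== CLAIM (what is proved, stated in full; the proofs are below) =====
def Claim_equal_subscript_numbers_py : Prop := ∀ (value : Int), Dom_subscript_numbers_py value → Spec_subscript_numbers_py value (subscript_numbers_py value)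

-- ===== LEMMAS AND PROOFS =====

-- a replace with a single-character pattern and replacement is a character map
theorem replace_go_single (a b : Char) (l : List Char) (fuel : Nat) (acc : List Char)
    (h : l.length ≤ fuel) :
    PySem.Chars.replace.go [a] [b] fuel l acc =
      acc.reverse ++ l.map (fun c => if c = a then b else c) := by
  induction l generalizing fuel acc with
  | nil => cases fuel <;> simp [PySem.Chars.replace.go]
  | cons c t ih =>
    cases fuel with
    | zero => simp at h
    | succ n =>
      simp only [PySem.Chars.replace.go]
      by_cases hc : c = a
      · subst hc
        simp only [List.isPrefixOf, BEq.rfl, Bool.true_and, if_true,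
          List.length_singleton, List.drop_one, List.tail_cons]
        rw [ih n ([b].reverse ++ acc) (by simpa using Nat.le_of_succ_le_succ h)]
        simp
      · have hpre : [a].isPrefixOf (c :: t) = false := by
          simp [List.isPrefixOf]; exact fun h' => hc h'.symm
        rw [hpre]
        simp only [Bool.false_eq_true, if_false]
        rw [ih n (c :: acc) (by simpa using Nat.le_of_succ_le_succ h)]
        simp [hc]

theorem replace_single (a b : Char) (l : List Char) :
    PySem.Chars.replace l [a] [b] = l.map (fun c => if c = a then b else c) := by
  simp only [PySem.Chars.replace, List.isEmpty_cons, Bool.false_eq_true, if_false]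
  simpa using replace_go_single a b l l.length [] (le_refl _)

-- ===== VERDICT (by name: the statement is the Claim_ definition above) =====
theorem subscript_numbers_py_spec : Claim_equal_subscript_numbers_py := by
  intro value _
  show subscript_numbers_py value = subscript_numbers_py_alt value
  have hL : (subscript_numbers_py value).toList = (subscript_numbers_py_alt value).toList := by
    simp only [subscript_numbers_py, subscript_numbers_py_alt, subscriptPairs, List.foldl]
    simp only [PySem.Str.toList_replace, PySem.Int.toList_toStr, String.toList_ofList,
      show ("0":String).toList = ['0'] from rfl, show ("1":String).toList = ['1'] from rfl, show ("2":String).toList = ['2'] from rfl, show ("3":String).toList = ['3'] from rfl, show ("4":String).toList = ['4'] from rfl, show ("5":String).toList = ['5'] from rfl, show ("6":String).toList = ['6'] from rfl, show ("7":String).toList = ['7'] from rfl, show ("8":String).toList = ['8'] from rfl, show ("9":String).toList = ['9'] from rfl,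
      show ("₀":String).toList = ['₀'] from rfl, show ("₁":String).toList = ['₁'] from rfl, show ("₂":String).toList = ['₂'] from rfl, show ("₃":String).toList = ['₃'] from rfl, show ("₄":String).toList = ['₄'] from rfl, show ("₅":String).toList = ['₅'] from rfl, show ("₆":String).toList = ['₆'] from rfl, show ("₇":String).toList = ['₇'] from rfl, show ("₈":String).toList = ['₈'] from rfl, show ("₉":String).toList = ['₉'] from rfl]
    rw [replace_single, replace_single, replace_single, replace_single, replace_single,
        replace_single, replace_single, replace_single, replace_single, replace_single]
    simp only [List.map_map]
    apply List.map_congr_left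
    intro c _
    by_cases h0 : c = '0'
    · subst h0; decide
    by_cases h1 : c = '1'
    · subst h1; decide
    by_cases h2 : c = '2'
    · subst h2; decide
    by_cases h3 : c = '3'
    · subst h3; decide
    by_cases h4 : c = '4'
    · subst h4; decide
    by_cases h5 : c = '5'
    · subst h5; decide
    by_cases h6 : c = '6'
    · subst h6; decide
    by_cases h7 : c = '7'
    · subst h7; decide
    by_cases h8 : c = '8'
    · subst h8; decide
    by_cases h9 : c = '9'
    · subst h9; decide
    simp [h0, h1, h2, h3, h4, h5, h6, h7, h8, h9, subscriptDict, PySem.Dict.getD,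
      PySem.Dict.get?, List.find?, Option.getD, beq_eq_decide, eq_comm]
  exact String.toList_inj.mp hL
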